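-- pv_equiv track=rewrite | github.com/mono1230/makespan | MakespanExperimentals/Main.py | ListSchedule
-- ===== SOURCE A (Python) =====
-- def ListSchedule(numOfMachines, input):
--     machines = [0]*numOfMachines
--     for i in input:
--         (p,q) = min((a,b) for b,a in enumerate(machines))
--         machines[q] = machines[q]+i
--
--     makespan = 0
--     for j in machines:
--         if j > makespan:
--             makespan = j
--     return makespan
-- ===== SOURCE B (Python) =====
-- def ListSchedule(numOfMachines, input):
--     # Keep the machine loads in an ascending-sorted list: the head is always the
--     # least-loaded machine (no minimum scan), each job re-inserts the updated
--     # load at the position found by binary search, and the makespan is just the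
--     # last element at the end.
--     loads = [0] * numOfMachines
--     for i in input:
--         new = loads[0] + i
--         del loads[0]
--         lo, hi = 0, len(loads)
--         while lo < hi:
--             mid = (lo + hi) // 2
--             if loads[mid] <= new:
--                 lo = mid + 1
--             else:
--                 hi = mid
--         loads.insert(lo, new)
--     if loads and loads[-1] > 0:
--         return loads[-1]
--     return 0
-- ===== Notes on version B (the rewrite author's own statement) =====
-- stated objective: faster
-- what changed: B keeps the machine loads in an ascending-sorted list (head is always the least-loaded machine, re-inserted by a hand-rolled binary search) instead of A's per-job linear minimum scan over all machines, and reads the makespan off the last element instead of a final max loop.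
import Mathlib
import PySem

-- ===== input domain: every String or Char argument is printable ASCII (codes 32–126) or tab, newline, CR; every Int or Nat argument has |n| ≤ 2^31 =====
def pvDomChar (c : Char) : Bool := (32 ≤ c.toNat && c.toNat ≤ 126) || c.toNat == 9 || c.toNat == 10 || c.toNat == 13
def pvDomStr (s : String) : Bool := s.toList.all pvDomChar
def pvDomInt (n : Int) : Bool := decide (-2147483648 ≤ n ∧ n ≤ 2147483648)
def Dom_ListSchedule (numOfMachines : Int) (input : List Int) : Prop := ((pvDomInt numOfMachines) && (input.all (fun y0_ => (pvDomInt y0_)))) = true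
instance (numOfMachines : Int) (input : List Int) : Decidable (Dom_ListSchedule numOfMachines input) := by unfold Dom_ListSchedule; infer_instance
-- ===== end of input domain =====

-- B keeps the machine loads in an ascending-sorted list (head = least-loaded machine,
-- re-insertion by binary search, makespan = last element) instead of A's per-job
-- minimum scan; equal return values are proved on Pre_ (A raises outside it).

-- ===== PORT A =====
-- Python's tuple comparison inside min(...): (y beats m iff y < m lexicographically)
def pmin (m y : Int × Int) : Int × Int :=
  if y.1 < m.1 ∨ (y.1 = m.1 ∧ y.2 < m.2) then y else m

-- min((a,b) for b,a in enumerate(machines)): lexicographic min, ties keep the earlier pair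
def pyMinLex (l : List (Int × Int)) : Option (Int × Int) :=
  match l with
  | [] => none
  | x :: t => some (t.foldl pmin x)

def ListSchedule (numOfMachines : Int) (input : List Int) : Int :=
  let machines := List.replicate numOfMachines.toNat (0 : Int)
  let machines := input.foldl (fun machines i =>
    match pyMinLex ((PySem.List.enumerate machines 0).map (fun bp => (bp.2, bp.1))) with
    | none => machines   -- Python raises ValueError here (min of empty); excluded by Pre_
    | some pq => machines.set pq.2.toNat (machines.getD pq.2.toNat 0 + i)) machines
  machines.foldl (fun mk j => if j > mk then j else mk) 0

-- ===== PORT B =====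
-- the hand-written binary-search loop of Source B (Python's local `mid` is inlined):
-- insertion point for v in the sorted list xs, after any equal elements
def bsearch (xs : List Int) (v : Int) (lo hi : Nat) : Nat :=
  if lo < hi then
    if xs.getD ((lo + hi) / 2) 0 ≤ v then bsearch xs v ((lo + hi) / 2 + 1) hi
    else bsearch xs v lo ((lo + hi) / 2)
  else lo
termination_by hi - lo
decreasing_by all_goals omega

def ListSchedule_alt (numOfMachines : Int) (input : List Int) : Int :=
  let loads := List.replicate numOfMachines.toNat (0 : Int)
  let loads := input.foldl (fun loads i =>
    match loads with
    | [] => []      -- Python raises IndexError here (loads[0] of []); excluded by Pre_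
    | x :: t =>     -- new = loads[0] + i; del loads[0]
      PySem.List.insert t ((bsearch t (x + i) 0 t.length : Nat) : Int) (x + i)) loads
  match loads.getLast? with   -- if loads and loads[-1] > 0: return loads[-1]; return 0
  | some l => if l > 0 then l else 0
  | none => 0

-- ===== PRECONDITION & SPEC =====
-- Pre_ excludes numOfMachines ≤ 0 together with a nonempty job list: there A's
-- min() over the empty machine list raises ValueError (and B's loads[0] raises too).
def Pre_ListSchedule (numOfMachines : Int) (input : List Int) : Prop :=
  1 ≤ numOfMachines ∨ input = []
instance (numOfMachines : Int) (input : List Int) : Decidable (Pre_ListSchedule numOfMachines input) := by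
  unfold Pre_ListSchedule; infer_instance

def pvWitness_ListSchedule : Int × List Int := (3, [5, 2, 7, 2])

def Spec_ListSchedule (numOfMachines : Int) (input : List Int) (out : Int) : Prop := out = ListSchedule_alt numOfMachines input
instance (numOfMachines : Int) (input : List Int) (out : Int) : Decidable (Spec_ListSchedule numOfMachines input out) := by unfold Spec_ListSchedule; infer_instance

-- ===== CLAIM (what is proved, stated in full; the proofs are below) =====
def Claim_equal_ListSchedule : Prop := ∀ (numOfMachines : Int) (input : List Int), Dom_ListSchedule numOfMachines input → Pre_ListSchedule numOfMachines input → Spec_ListSchedule numOfMachines input (ListSchedule numOfMachines input)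

-- ===== LEMMAS AND PROOFS =====

-- named forms of the two loop bodies (definitionally the lambdas of the ports)
def stepA (machines : List Int) (i : Int) : List Int :=
  match pyMinLex ((PySem.List.enumerate machines 0).map (fun bp => (bp.2, bp.1))) with
  | none => machines
  | some pq => machines.set pq.2.toNat (machines.getD pq.2.toNat 0 + i)

def stepB (loads : List Int) (i : Int) : List Int :=
  match loads with
  | [] => []
  | x :: t => PySem.List.insert t ((bsearch t (x + i) 0 t.length : Nat) : Int) (x + i)

theorem LS_eq (n : Int) (input : List Int) :
    ListSchedule n input =
      (input.foldl stepA (List.replicate n.toNat 0)).foldl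
        (fun mk j => if j > mk then j else mk) 0 := rfl

theorem LS_alt_eq (n : Int) (input : List Int) :
    ListSchedule_alt n input =
      match (input.foldl stepB (List.replicate n.toNat 0)).getLast? with
      | some l => if l > 0 then l else 0
      | none => 0 := rfl

theorem pmin_cases (m y : Int × Int) :
    (pmin m y = y ∨ pmin m y = m) ∧ (pmin m y).1 ≤ m.1 ∧ (pmin m y).1 ≤ y.1 := by
  unfold pmin
  split
  next h => exact ⟨Or.inl rfl, by omega, le_rfl⟩
  next h => exact ⟨Or.inr rfl, le_rfl, by omega⟩

-- the lex-min fold returns a member of the list whose first component is minimal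
theorem foldl_min_spec (t : List (Int × Int)) (x : Int × Int) :
    t.foldl pmin x ∈ x :: t ∧ ∀ y ∈ x :: t, (t.foldl pmin x).1 ≤ y.1 := by
  induction t generalizing x with
  | nil => simp
  | cons y t ih =>
    obtain ⟨hmem, hle⟩ := ih (pmin x y)
    obtain ⟨hcase, hle1, hle2⟩ := pmin_cases x y
    simp only [List.foldl_cons]
    constructor
    · rw [List.mem_cons] at hmem ⊢
      rcases hmem with h1 | h1
      · rcases hcase with h2 | h2 <;> rw [h1, h2] <;> simp
      · simp [h1]
    · intro z hz
      rw [List.mem_cons] at hz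
      have hpx : (t.foldl pmin (pmin x y)).1 ≤ (pmin x y).1 := hle _ List.mem_cons_self
      rcases hz with rfl | hz
      · exact le_trans hpx hle1
      · rcases List.mem_cons.mp hz with rfl | hz2
        · exact le_trans hpx hle2
        · exact hle z (List.mem_cons_of_mem _ hz2)

-- A's step replaces one minimal element p by p + i (up to permutation)
theorem stepA_spec (m : List Int) (i : Int) (hm : m ≠ []) :
    ∃ p rest, (∀ y ∈ m, p ≤ y) ∧ m.Perm (p :: rest) ∧ (stepA m i).Perm ((p + i) :: rest) := by
  obtain ⟨a, m', rfl⟩ := List.exists_cons_of_ne_nil hm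
  have hEnum : (PySem.List.enumerate (a :: m') 0).map (fun bp => (bp.2, bp.1)) =
      (a, 0) :: (PySem.List.enumerate m' 1).map (fun bp => (bp.2, bp.1)) := by
    rw [PySem.List.enumerate_cons]; simp
  set E := (PySem.List.enumerate m' 1).map (fun bp => (bp.2, bp.1)) with hE
  have hspec := foldl_min_spec E (a, 0)
  set r := E.foldl pmin (a, 0) with hr
  have hstep : stepA (a :: m') i = (a :: m').set r.2.toNat ((a :: m').getD r.2.toNat 0 + i) := by
    simp only [stepA, hEnum, pyMinLex, ← hr]
  have hmemE := hspec.1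
  rw [List.mem_cons] at hmemE
  have hmem : ∃ (k : Nat) (h : k < (a :: m').length), r = ((a :: m')[k], ((k : Nat) : Int)) := by
    rcases hmemE with h1 | h1
    · exact ⟨0, by simp, by simp [h1]⟩
    · rw [hE, List.mem_map] at h1
      obtain ⟨bp, hbp, hbpr⟩ := h1
      rw [PySem.List.mem_enumerate_iff] at hbp
      obtain ⟨k, hkm, rfl⟩ := hbp
      refine ⟨k + 1, by simp only [List.length_cons]; omega, ?_⟩
      rw [← hbpr]
      simp only [Prod.mk.injEq, List.getElem_cons_succ]
      exact ⟨trivial, by push_cast; ring⟩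
  obtain ⟨k, hk, hrk⟩ := hmem
  have hmin : ∀ y ∈ (a :: m'), r.1 ≤ y := by
    intro y hy
    rw [List.mem_iff_getElem] at hy
    obtain ⟨j, hj, rfl⟩ := hy
    cases j with
    | zero => simpa using hspec.2 (a, 0) List.mem_cons_self
    | succ j' =>
      refine le_of_eq (rfl) |>.trans (hspec.2 ((a :: m')[j' + 1], ((j' + 1 : Nat) : Int))
        (List.mem_cons_of_mem _ ?_))
      rw [hE]
      simp only [List.mem_map]
      refine ⟨(((j' + 1 : Nat) : Int), (a :: m')[j' + 1]), ?_, rfl⟩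
      rw [PySem.List.mem_enumerate_iff]
      refine ⟨j', by simp only [List.length_cons] at hj; omega, ?_⟩
      simp only [Prod.mk.injEq, List.getElem_cons_succ]
      exact ⟨by push_cast; ring, trivial⟩
  have hr2 : r.2 = ((k : Nat) : Int) := by rw [hrk]
  have hr1 : r.1 = (a :: m')[k] := by rw [hrk]
  refine ⟨(a :: m')[k], (a :: m').eraseIdx k, ?_, ?_, ?_⟩
  · intro y hy
    have := hmin y hy
    rwa [hr1] at this
  · have hsplit : (a :: m') = (a :: m').take k ++ (a :: m')[k] :: (a :: m').drop (k + 1) := by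
      rw [← List.drop_eq_getElem_cons hk, List.take_append_drop]
    rw [List.eraseIdx_eq_take_drop_succ]
    conv_lhs => rw [hsplit]
    exact List.perm_middle
  · rw [hstep, hr2, Int.toNat_natCast, List.getD_eq_getElem _ _ hk,
      List.set_eq_take_cons_drop _ hk, List.eraseIdx_eq_take_drop_succ]
    exact List.perm_middle

-- binary-search invariant: bsearch returns a valid insertion point
-- (induction on the fuel d bounding hi - lo)
theorem bsearch_spec_aux (xs : List Int) (v : Int) : ∀ (d lo hi : Nat), hi - lo ≤ d →
    hi ≤ xs.length → lo ≤ hi →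
    (∀ (j : Nat), (h : j < xs.length) → j < lo → xs[j] ≤ v) →
    (∀ (j : Nat), (h : j < xs.length) → hi ≤ j → v < xs[j]) →
    xs.Pairwise (· ≤ ·) →
    bsearch xs v lo hi ≤ xs.length ∧
    (∀ (j : Nat), (h : j < xs.length) → j < bsearch xs v lo hi → xs[j] ≤ v) ∧
    (∀ (j : Nat), (h : j < xs.length) → bsearch xs v lo hi ≤ j → v < xs[j]) := by
  intro d
  induction d with
  | zero =>
    intro lo hi hd hhi hlohi hL hR hs
    have h : ¬ lo < hi := by omega
    rw [bsearch, if_neg h]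
    have : lo = hi := by omega
    subst this
    exact ⟨hhi, fun j hj hjlt => hL j hj hjlt, fun j hj hjge => hR j hj hjge⟩
  | succ d ih =>
    intro lo hi hd hhi hlohi hL hR hs
    by_cases h : lo < hi
    · rw [bsearch, if_pos h]
      have hmid : (lo + hi) / 2 < xs.length := by omega
      rw [List.getD_eq_getElem _ _ hmid]
      by_cases hc : xs[(lo + hi) / 2] ≤ v
      · rw [if_pos hc]
        refine ih ((lo + hi) / 2 + 1) hi (by omega) hhi (by omega) ?_ hR hs
        intro j hj hjlt
        rcases Nat.lt_or_ge j ((lo + hi) / 2) with hj2 | hj2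
        · exact le_trans (List.pairwise_iff_getElem.mp hs j ((lo + hi) / 2) hj hmid hj2) hc
        · have : j = (lo + hi) / 2 := by omega
          subst this; exact hc
      · rw [if_neg hc]
        refine ih lo ((lo + hi) / 2) (by omega) (by omega) (by omega) hL ?_ hs
        intro j hj hjge
        rcases Nat.lt_or_ge ((lo + hi) / 2) j with hj2 | hj2
        · exact lt_of_lt_of_le (by omega) (List.pairwise_iff_getElem.mp hs _ j hmid hj hj2)
        · have : j = (lo + hi) / 2 := by omega
          subst this; omega
    · rw [bsearch, if_neg h]
      have : lo = hi := by omega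
      subst this
      exact ⟨hhi, fun j hj hjlt => hL j hj hjlt, fun j hj hjge => hR j hj hjge⟩

theorem bsearch_spec (xs : List Int) (v : Int) (lo hi : Nat)
    (hhi : hi ≤ xs.length) (hlohi : lo ≤ hi)
    (hL : ∀ (j : Nat), (h : j < xs.length) → j < lo → xs[j] ≤ v)
    (hR : ∀ (j : Nat), (h : j < xs.length) → hi ≤ j → v < xs[j])
    (hs : xs.Pairwise (· ≤ ·)) :
    bsearch xs v lo hi ≤ xs.length ∧
    (∀ (j : Nat), (h : j < xs.length) → j < bsearch xs v lo hi → xs[j] ≤ v) ∧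
    (∀ (j : Nat), (h : j < xs.length) → bsearch xs v lo hi ≤ j → v < xs[j]) :=
  bsearch_spec_aux xs v (hi - lo) lo hi le_rfl hhi hlohi hL hR hs

-- B's step on a sorted nonempty list: removes the head (a minimum) and re-inserts
-- head + i, preserving sortedness and the multiset
theorem stepB_spec (x : Int) (t : List Int) (i : Int) (hs : (x :: t).Pairwise (· ≤ ·)) :
    (stepB (x :: t) i).Perm ((x + i) :: t) ∧ (stepB (x :: t) i).Pairwise (· ≤ ·) := by
  have hst : t.Pairwise (· ≤ ·) := hs.of_cons
  obtain ⟨hk, hl, hr⟩ := bsearch_spec t (x + i) 0 t.length le_rfl (Nat.zero_le _)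
    (fun j hj hlt => absurd hlt (by omega)) (fun j hj hge => absurd hj (by omega)) hst
  have hins : stepB (x :: t) i = t.take (bsearch t (x + i) 0 t.length) ++
      (x + i) :: t.drop (bsearch t (x + i) 0 t.length) := by
    simp only [stepB]
    exact PySem.List.insert_natCast t _ (x + i) hk
  set k := bsearch t (x + i) 0 t.length with hkdef
  constructor
  · rw [hins]
    refine List.Perm.trans List.perm_middle ?_
    rw [List.take_append_drop]
  · rw [hins, List.pairwise_append]
    refine ⟨hst.take, List.pairwise_cons.mpr ⟨?_, hst.drop⟩, ?_⟩
    · intro y hy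
      rw [List.mem_iff_getElem] at hy
      obtain ⟨j, hj, rfl⟩ := hy
      have hjlen : k + j < t.length := by simp only [List.length_drop] at hj; omega
      rw [List.getElem_drop]
      exact le_of_lt (hr (k + j) hjlen (by omega))
    · intro a ha b hb
      rw [List.mem_iff_getElem] at ha
      obtain ⟨j, hj, rfl⟩ := ha
      have hjk : j < k := by simp only [List.length_take] at hj; omega
      have hjlen : j < t.length := by simp only [List.length_take] at hj; omega
      rw [List.getElem_take]
      have haj : t[j] ≤ x + i := hl j hjlen hjk
      rcases List.mem_cons.mp hb with rfl | hb2
      · exact haj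
      · rw [List.mem_iff_getElem] at hb2
        obtain ⟨j', hj', rfl⟩ := hb2
        have hjlen' : k + j' < t.length := by simp only [List.length_drop] at hj'; omega
        rw [List.getElem_drop]
        rcases Nat.lt_or_ge j (k + j') with hlt | hge
        · exact List.pairwise_iff_getElem.mp hst j (k + j') hjlen hjlen' hlt
        · have : j = k + j' := by omega
          subst this
          exact le_rfl

-- one step keeps the two states permutation-equal, and B's state sorted
theorem step_agree (mA lB : List Int) (i : Int) (hp : mA.Perm lB) (hs : lB.Pairwise (· ≤ ·)) :
    (stepA mA i).Perm (stepB lB i) ∧ (stepB lB i).Pairwise (· ≤ ·) := by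
  cases lB with
  | nil =>
    have : mA = [] := hp.eq_nil
    subst this
    simp [stepA, stepB, PySem.List.enumerate_nil, pyMinLex]
  | cons x t =>
    have hmA : mA ≠ [] := by
      intro h; subst h; exact absurd hp.symm.eq_nil (by simp)
    obtain ⟨p, rest, hpmin, hperm1, hperm2⟩ := stepA_spec mA i hmA
    obtain ⟨hBperm, hBsorted⟩ := stepB_spec x t i hs
    have hx_mem : x ∈ mA := hp.symm.subset List.mem_cons_self
    have hp_mem : p ∈ x :: t := hp.subset (hperm1.symm.subset List.mem_cons_self)
    have hxmin : ∀ y ∈ x :: t, x ≤ y := by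
      intro y hy
      rcases List.mem_cons.mp hy with rfl | hy2
      · exact le_rfl
      · exact (List.pairwise_cons.mp hs).1 y hy2
    have hpx : p = x := le_antisymm (hpmin x hx_mem) (hxmin p hp_mem)
    subst hpx
    have hrt : rest.Perm t := (hperm1.symm.trans hp).cons_inv
    refine ⟨?_, hBsorted⟩
    exact hperm2.trans ((hrt.cons _).trans hBperm.symm)

-- the loop invariant over the whole input
theorem fold_agree (input : List Int) (mA lB : List Int) (hp : mA.Perm lB)
    (hs : lB.Pairwise (· ≤ ·)) :
    (input.foldl stepA mA).Perm (input.foldl stepB lB) ∧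
    (input.foldl stepB lB).Pairwise (· ≤ ·) := by
  induction input generalizing mA lB with
  | nil => exact ⟨hp, hs⟩
  | cons i input ih =>
    obtain ⟨hp', hs'⟩ := step_agree mA lB i hp hs
    exact ih _ _ hp' hs'

-- A's makespan loop is foldl max
theorem foldl_ifmax_eq_max (l : List Int) (a : Int) :
    l.foldl (fun mk j => if j > mk then j else mk) a = l.foldl max a := by
  induction l generalizing a with
  | nil => rfl
  | cons x l ih =>
    simp only [List.foldl_cons]
    rw [ih]
    congr 1
    simp only [max_def]
    split_ifs <;> omega

-- foldl max over a sorted list is the max of the seed and the last element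
theorem foldl_max_sorted (l : List Int) (hs : l.Pairwise (· ≤ ·)) : ∀ (a : Int),
    l.foldl max a = match l.getLast? with | some v => max a v | none => a := by
  induction l with
  | nil => intro a; rfl
  | cons x t ih =>
    intro a
    simp only [List.foldl_cons]
    rw [ih hs.of_cons]
    cases t with
    | nil => simp
    | cons y t' =>
      rw [List.getLast?_cons_cons]
      cases hv : (y :: t').getLast? with
      | none => simp at hv
      | some v =>
        have hvmem : v ∈ y :: t' := List.mem_of_getLast? hv
        have hxv : x ≤ v := (List.pairwise_cons.mp hs).1 v hvmem
        simp only [max_def]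
        split_ifs <;> omega

theorem max_zero_pos (l : Int) : max 0 l = if l > 0 then l else 0 := by
  simp only [max_def]
  split_ifs <;> omega

-- ===== VERDICT (by name: the statement is the Claim_ definition above) =====
theorem ListSchedule_spec : Claim_equal_ListSchedule := by
  intro numOfMachines input _hdom _hpre
  unfold Spec_ListSchedule
  rw [LS_eq, LS_alt_eq]
  obtain ⟨hperm, hsorted⟩ := fold_agree input (List.replicate numOfMachines.toNat 0)
    (List.replicate numOfMachines.toNat 0) (List.Perm.refl _) List.pairwise_replicate_of_refl
  rw [foldl_ifmax_eq_max, hperm.foldl_eq, foldl_max_sorted _ hsorted]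
  cases hlast : (input.foldl stepB (List.replicate numOfMachines.toNat 0)).getLast? with
  | none => rfl
  | some v => exact max_zero_pos v
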